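-- pv_equiv track=rewrite | github.com/esborisova/conspiracies | src/conspiracies/extracting_ents_heads/functions.py | filter_ne_type
-- ===== SOURCE A (Python) =====
-- def filter_ne_type(ents_heads: dict) -> dict:
--   """Narrows down entities/headwords to the predifiend list of named entity types
--    Args:
--        ents_heads (dict): A dictionary with entities/headwords as keys and their frequencies as values
--    Returns:
--        new_dict (list): A dictionary containing only entities/headwords (and their freq) belonging to the defined group of entity types
--   """
--
--   ent_types = ['LOC', 'MISC', 'ORG', 'PER']
--
--   new_dict = {}
--
--   for tag in ent_types:
--     for key, value in ents_heads.items():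
--       if tag in key:
--         new_dict[key] = value
--   return new_dict
-- ===== SOURCE B (Python) =====
-- def filter_ne_type(ents_heads: dict) -> dict:
--   """Single pass: each entity goes into the bucket of its first matching tag;
--   buckets are concatenated in tag order."""
--   tags = ('LOC', 'MISC', 'ORG', 'PER')
--   buckets = {tag: {} for tag in tags}
--   for key, value in ents_heads.items():
--     for tag in tags:
--       if tag in key:
--         buckets[tag][key] = value
--         break
--   new_dict = {}
--   for tag in tags:
--     new_dict.update(buckets[tag])
--   return new_dict
-- ===== Notes on version B (the rewrite author's own statement) =====
-- stated objective: alternative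
-- what changed: B replaces A's four full passes over the dict (one per tag, relying on dict re-insertion keeping position to deduplicate multi-tag keys) by a single pass that drops each key into the bucket of its first matching tag (early break) and then concatenates the buckets in tag order.
import Mathlib
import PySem

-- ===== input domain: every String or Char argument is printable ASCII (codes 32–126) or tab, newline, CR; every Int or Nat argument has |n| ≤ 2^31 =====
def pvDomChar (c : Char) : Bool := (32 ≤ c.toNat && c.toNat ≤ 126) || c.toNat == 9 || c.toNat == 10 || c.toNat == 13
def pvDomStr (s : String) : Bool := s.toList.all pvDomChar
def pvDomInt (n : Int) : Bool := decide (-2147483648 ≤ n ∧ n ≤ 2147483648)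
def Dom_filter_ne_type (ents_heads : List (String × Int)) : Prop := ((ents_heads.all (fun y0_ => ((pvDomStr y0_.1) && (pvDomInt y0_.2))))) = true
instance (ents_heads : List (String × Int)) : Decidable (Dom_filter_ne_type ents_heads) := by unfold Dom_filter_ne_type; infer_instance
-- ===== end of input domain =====

-- B makes one pass with per-tag buckets instead of A's four passes with dict overwrite (alternative decomposition, same cost class).

-- ===== PORT A =====
-- A: for tag in ['LOC','MISC','ORG','PER']: for key, value in ents_heads.items(): if tag in key: new_dict[key] = value
def filter_ne_type (ents_heads : List (String × Int)) : List (String × Int) :=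
  ((["LOC", "MISC", "ORG", "PER"] : List String).foldl (fun d tag =>
      ents_heads.foldl (fun d kv =>
        if PySem.Str.isIn tag kv.1 then d.insert kv.1 kv.2 else d) d)
    (PySem.Dict.empty : PySem.Dict String Int)).items

-- ===== PORT B =====
-- B: one pass; each key goes into the bucket of its first matching tag (break); buckets concatenated in tag order.
def filter_ne_type_alt (ents_heads : List (String × Int)) : List (String × Int) :=
  let b := ents_heads.foldl
    (fun (b : List (String × Int) × List (String × Int) × List (String × Int) × List (String × Int)) kv =>
      if PySem.Str.isIn "LOC" kv.1 then (b.1 ++ [kv], b.2.1, b.2.2.1, b.2.2.2)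
      else if PySem.Str.isIn "MISC" kv.1 then (b.1, b.2.1 ++ [kv], b.2.2.1, b.2.2.2)
      else if PySem.Str.isIn "ORG" kv.1 then (b.1, b.2.1, b.2.2.1 ++ [kv], b.2.2.2)
      else if PySem.Str.isIn "PER" kv.1 then (b.1, b.2.1, b.2.2.1, b.2.2.2 ++ [kv])
      else b)
    ([], [], [], [])
  b.1 ++ b.2.1 ++ b.2.2.1 ++ b.2.2.2

-- ===== PRECONDITION & SPEC =====
-- Pre_ excludes association lists with duplicate keys: A's parameter is a Python dict, whose keys are
-- necessarily distinct, so such lists do not encode any input A is ever given.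
def Pre_filter_ne_type (ents_heads : List (String × Int)) : Prop :=
  (ents_heads.map Prod.fst).Nodup
instance (ents_heads : List (String × Int)) : Decidable (Pre_filter_ne_type ents_heads) := by
  unfold Pre_filter_ne_type; infer_instance
def pvWitness_filter_ne_type : (List (String × Int)) := [("the LOC", 3), ("xPER", -1), ("plain", 0)]

def Spec_filter_ne_type (ents_heads : List (String × Int)) (out : List (String × Int)) : Prop := out = filter_ne_type_alt ents_heads
instance (ents_heads : List (String × Int)) (out : List (String × Int)) : Decidable (Spec_filter_ne_type ents_heads out) := by unfold Spec_filter_ne_type; infer_instance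

-- ===== CLAIM (what is proved, stated in full; the proofs are below) =====
def Claim_equal_filter_ne_type : Prop := ∀ (ents_heads : List (String × Int)), Dom_filter_ne_type ents_heads → Pre_filter_ne_type ents_heads → Spec_filter_ne_type ents_heads (filter_ne_type ents_heads)



-- ===== LEMMAS AND PROOFS =====

-- kv's first matching tag, as the four disjoint predicates B's buckets collect
def pvIsL (kv : String × Int) : Bool := PySem.Str.isIn "LOC" kv.1
def pvIsM (kv : String × Int) : Bool := !PySem.Str.isIn "LOC" kv.1 && PySem.Str.isIn "MISC" kv.1
def pvIsO (kv : String × Int) : Bool := !PySem.Str.isIn "LOC" kv.1 && !PySem.Str.isIn "MISC" kv.1 && PySem.Str.isIn "ORG" kv.1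
def pvIsP (kv : String × Int) : Bool := !PySem.Str.isIn "LOC" kv.1 && !PySem.Str.isIn "MISC" kv.1 && !PySem.Str.isIn "ORG" kv.1 && PySem.Str.isIn "PER" kv.1

-- A's inner loop over one tag, named for the stage-by-stage proof
def pvIns (t : String) (xs : List (String × Int)) (d : PySem.Dict String Int) : PySem.Dict String Int :=
  xs.foldl (fun d kv => if PySem.Str.isIn t kv.1 then d.insert kv.1 kv.2 else d) d

-- B's fold fills the four buckets with the four filters
theorem pvB_go (xs : List (String × Int)) (a b c d : List (String × Int)) :
    xs.foldl
      (fun (b : List (String × Int) × List (String × Int) × List (String × Int) × List (String × Int)) kv =>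
        if PySem.Str.isIn "LOC" kv.1 then (b.1 ++ [kv], b.2.1, b.2.2.1, b.2.2.2)
        else if PySem.Str.isIn "MISC" kv.1 then (b.1, b.2.1 ++ [kv], b.2.2.1, b.2.2.2)
        else if PySem.Str.isIn "ORG" kv.1 then (b.1, b.2.1, b.2.2.1 ++ [kv], b.2.2.2)
        else if PySem.Str.isIn "PER" kv.1 then (b.1, b.2.1, b.2.2.1, b.2.2.2 ++ [kv])
        else b)
      (a, b, c, d)
    = (a ++ xs.filter pvIsL, b ++ xs.filter pvIsM, c ++ xs.filter pvIsO, d ++ xs.filter pvIsP) := by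
  induction xs generalizing a b c d with
  | nil => simp
  | cons kv xs ih =>
      simp only [List.foldl_cons]
      split_ifs with h1 h2 h3 h4
      · have hL : pvIsL kv = true := by simp only [pvIsL, h1]
        have hM : pvIsM kv = false := by simp only [pvIsM, h1, Bool.not_true, Bool.false_and]
        have hO : pvIsO kv = false := by simp only [pvIsO, h1, Bool.not_true, Bool.false_and]
        have hP : pvIsP kv = false := by simp only [pvIsP, h1, Bool.not_true, Bool.false_and]
        rw [ih]
        simp [hL, hM, hO, hP]
      · simp only [Bool.not_eq_true] at h1
        have hL : pvIsL kv = false := by simp only [pvIsL, h1]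
        have hM : pvIsM kv = true := by simp only [pvIsM, h1, h2, Bool.not_false, Bool.true_and]
        have hO : pvIsO kv = false := by simp only [pvIsO, h2, Bool.not_true, Bool.and_false, Bool.false_and]
        have hP : pvIsP kv = false := by simp only [pvIsP, h2, Bool.not_true, Bool.and_false, Bool.false_and]
        rw [ih]
        simp [hL, hM, hO, hP]
      · simp only [Bool.not_eq_true] at h1 h2
        have hL : pvIsL kv = false := by simp only [pvIsL, h1]
        have hM : pvIsM kv = false := by simp only [pvIsM, h2, Bool.and_false]
        have hO : pvIsO kv = true := by
          simp only [pvIsO, h1, h2, h3, Bool.not_false, Bool.and_true]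
        have hP : pvIsP kv = false := by simp only [pvIsP, h3, Bool.not_true, Bool.and_false, Bool.false_and]
        rw [ih]
        simp [hL, hM, hO, hP]
      · simp only [Bool.not_eq_true] at h1 h2 h3
        have hL : pvIsL kv = false := by simp only [pvIsL, h1]
        have hM : pvIsM kv = false := by simp only [pvIsM, h2, Bool.and_false]
        have hO : pvIsO kv = false := by simp only [pvIsO, h3, Bool.and_false]
        have hP : pvIsP kv = true := by
          simp only [pvIsP, h1, h2, h3, h4, Bool.not_false, Bool.and_true]
        rw [ih]
        simp [hL, hM, hO, hP]
      · simp only [Bool.not_eq_true] at h1 h2 h3 h4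
        have hL : pvIsL kv = false := by simp only [pvIsL, h1]
        have hM : pvIsM kv = false := by simp only [pvIsM, h2, Bool.and_false]
        have hO : pvIsO kv = false := by simp only [pvIsO, h3, Bool.and_false]
        have hP : pvIsP kv = false := by simp only [pvIsP, h4, Bool.and_false]
        rw [ih]
        simp [hL, hM, hO, hP]

theorem pvB_eq (xs : List (String × Int)) :
    filter_ne_type_alt xs = xs.filter pvIsL ++ xs.filter pvIsM ++ xs.filter pvIsO ++ xs.filter pvIsP := by
  unfold filter_ne_type_alt
  rw [pvB_go]
  simp [List.append_assoc]

-- in a list with distinct keys, equal keys mean equal pairs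
theorem pvKeyInj {xs : List (String × Int)} (hn : (xs.map Prod.fst).Nodup)
    {p q : String × Int} (hp : p ∈ xs) (hq : q ∈ xs) (h : p.1 = q.1) : p = q := by
  induction xs with
  | nil => cases hp
  | cons x xs ih =>
      simp only [List.map_cons, List.nodup_cons] at hn
      rcases List.mem_cons.mp hp with rfl | hp' <;> rcases List.mem_cons.mp hq with rfl | hq'
      · rfl
      · exact absurd (h ▸ List.mem_map.mpr ⟨q, hq', rfl⟩) hn.1
      · exact absurd (h ▸ List.mem_map.mpr ⟨p, hp', rfl⟩) hn.1
      · exact ih hn.2 hp' hq'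

-- the keys of a dict holding exactly the p-elements of xs, read off on xs
theorem pvContains {xs : List (String × Int)} (hn : (xs.map Prod.fst).Nodup)
    (p : (String × Int) → Bool) (d : PySem.Dict String Int)
    (hd : ∀ q, q ∈ d.items ↔ q ∈ xs ∧ p q = true)
    {kv : String × Int} (hkv : kv ∈ xs) : d.contains kv.1 = p kv := by
  cases hpk : p kv with
  | true =>
      exact (PySem.Dict.contains_iff_mem_keys d kv.1).mpr
        (List.mem_map.mpr ⟨kv, (hd kv).mpr ⟨hkv, hpk⟩, rfl⟩)
  | false =>
      cases hc : d.contains kv.1 with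
      | false => rfl
      | true =>
          exfalso
          obtain ⟨q, hq, hq1⟩ := List.mem_map.mp ((PySem.Dict.contains_iff_mem_keys d kv.1).mp hc)
          obtain ⟨hqx, hqp⟩ := (hd q).mp hq
          rw [pvKeyInj hn hqx hkv hq1] at hqp
          rw [hqp] at hpk
          cases hpk

-- A's inner loop appends the not-yet-present matching pairs
theorem pvInner (t : String) (xs : List (String × Int)) (d : PySem.Dict String Int)
    (h1 : (xs.map Prod.fst).Nodup)
    (h2 : ∀ kv ∈ xs, ∀ q ∈ d.items, q.1 = kv.1 → q = kv) :
    (pvIns t xs d).items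
      = d.items ++ xs.filter (fun kv => PySem.Str.isIn t kv.1 && !(d.contains kv.1)) := by
  induction xs generalizing d with
  | nil => simp [pvIns]
  | cons kv xs ih =>
      simp only [List.map_cons, List.nodup_cons] at h1
      have step : pvIns t (kv :: xs) d
          = pvIns t xs (if PySem.Str.isIn t kv.1 then d.insert kv.1 kv.2 else d) := rfl
      rw [step]
      simp only [List.filter_cons]
      by_cases ht : PySem.Str.isIn t kv.1 = true
      · rw [if_pos ht]
        cases hc : d.contains kv.1 with
        | true =>
            have hdeq : d.insert kv.1 kv.2 = d := by
              apply PySem.Dict.ext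
              rw [PySem.Dict.items_insert_of_contains d kv.2 hc]
              conv_rhs => rw [← List.map_id d.items]
              apply List.map_congr_left
              intro q hq
              by_cases hbe : q.1 = kv.1
              · have hqkv : q = kv := h2 kv List.mem_cons_self q hq hbe
                simp [hqkv]
              · simp [hbe]
            rw [hdeq, ht]
            simp only [Bool.not_true, Bool.and_false, Bool.false_eq_true, if_false]
            exact ih d h1.2 (fun r hr => h2 r (List.mem_cons_of_mem _ hr))
        | false =>
            have h2' : ∀ r ∈ xs, ∀ q ∈ (d.insert kv.1 kv.2).items, q.1 = r.1 → q = r := by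
              intro r hr q hq hqr
              rw [PySem.Dict.items_insert_of_not_contains d kv.2 hc] at hq
              rcases List.mem_append.mp hq with hq' | hq'
              · exact h2 r (List.mem_cons_of_mem _ hr) q hq' hqr
              · exfalso
                have hqkv : q = kv := by simpa using hq'
                subst hqkv
                exact h1.1 (hqr ▸ List.mem_map.mpr ⟨r, hr, rfl⟩)
            rw [ih _ h1.2 h2', PySem.Dict.items_insert_of_not_contains d kv.2 hc]
            rw [ht]
            simp only [Bool.not_false, Bool.and_true, if_true]
            have hf : xs.filter (fun r => PySem.Str.isIn t r.1 && !((d.insert kv.1 kv.2).contains r.1))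
                = xs.filter (fun r => PySem.Str.isIn t r.1 && !(d.contains r.1)) := by
              apply List.filter_congr
              intro r hr
              rw [PySem.Dict.contains_insert]
              have hne : (r.1 == kv.1) = false := by
                apply beq_eq_false_iff_ne.mpr
                intro e
                exact h1.1 (e ▸ List.mem_map.mpr ⟨r, hr, rfl⟩)
              rw [hne, Bool.false_or]
            rw [hf]
            simp
      · rw [if_neg ht]
        have ht' : PySem.Str.isIn t kv.1 = false := by simpa using ht
        rw [ht']
        simp only [Bool.false_and, Bool.false_eq_true, if_false]
        exact ih d h1.2 (fun r hr => h2 r (List.mem_cons_of_mem _ hr))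

theorem pvA_eq (xs : List (String × Int)) (hn : (xs.map Prod.fst).Nodup) :
    filter_ne_type xs = xs.filter pvIsL ++ xs.filter pvIsM ++ xs.filter pvIsO ++ xs.filter pvIsP := by
  have bool3 : ∀ a b c : Bool, (c && !(a || (!a && b))) = (!a && !b && c) := by decide
  have bool4 : ∀ a b c d : Bool,
      (d && !(a || !a && b || (!a && !b && c))) = (!a && !b && !c && d) := by decide
  have hA : filter_ne_type xs
      = (pvIns "PER" xs (pvIns "ORG" xs (pvIns "MISC" xs (pvIns "LOC" xs PySem.Dict.empty)))).items := rfl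
  have hit : (PySem.Dict.empty : PySem.Dict String Int).items = ([] : List (String × Int)) := rfl
  -- stage 1: LOC
  have e1 : (pvIns "LOC" xs PySem.Dict.empty).items = xs.filter pvIsL := by
    rw [pvInner _ _ _ hn (by rw [hit]; intro kv _ q hq; cases hq), hit, List.nil_append]
    apply List.filter_congr
    intro r _
    rw [PySem.Dict.contains_empty]
    simp only [pvIsL, Bool.not_false, Bool.and_true]
  have c1 : ∀ kv ∈ xs, (pvIns "LOC" xs PySem.Dict.empty).contains kv.1 = pvIsL kv := by
    intro kv hkv
    exact pvContains hn pvIsL _ (fun q => by rw [e1]; exact List.mem_filter) hkv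
  have h2_1 : ∀ kv ∈ xs, ∀ q ∈ (pvIns "LOC" xs PySem.Dict.empty).items, q.1 = kv.1 → q = kv := by
    intro kv hkv q hq h
    rw [e1] at hq
    exact pvKeyInj hn (List.mem_filter.mp hq).1 hkv h
  -- stage 2: MISC
  have e2 : (pvIns "MISC" xs (pvIns "LOC" xs PySem.Dict.empty)).items
      = xs.filter pvIsL ++ xs.filter pvIsM := by
    rw [pvInner _ _ _ hn h2_1, e1]
    congr 1
    apply List.filter_congr
    intro r hr
    rw [c1 r hr]
    simp only [pvIsL, pvIsM]
    exact Bool.and_comm _ _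
  have c2 : ∀ kv ∈ xs, (pvIns "MISC" xs (pvIns "LOC" xs PySem.Dict.empty)).contains kv.1
      = (pvIsL kv || pvIsM kv) := by
    intro kv hkv
    refine pvContains hn (fun q => pvIsL q || pvIsM q) _ (fun q => ?_) hkv
    rw [e2]
    simp only [List.mem_append, List.mem_filter, Bool.or_eq_true]
    tauto
  have h2_2 : ∀ kv ∈ xs, ∀ q ∈ (pvIns "MISC" xs (pvIns "LOC" xs PySem.Dict.empty)).items,
      q.1 = kv.1 → q = kv := by
    intro kv hkv q hq h
    rw [e2] at hq
    rcases List.mem_append.mp hq with hq' | hq' <;>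
      exact pvKeyInj hn (List.mem_filter.mp hq').1 hkv h
  -- stage 3: ORG
  have e3 : (pvIns "ORG" xs (pvIns "MISC" xs (pvIns "LOC" xs PySem.Dict.empty))).items
      = xs.filter pvIsL ++ xs.filter pvIsM ++ xs.filter pvIsO := by
    rw [pvInner _ _ _ hn h2_2, e2]
    congr 1
    apply List.filter_congr
    intro r hr
    rw [c2 r hr]
    simp only [pvIsL, pvIsM, pvIsO]
    exact bool3 _ _ _
  have c3 : ∀ kv ∈ xs,
      (pvIns "ORG" xs (pvIns "MISC" xs (pvIns "LOC" xs PySem.Dict.empty))).contains kv.1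
      = (pvIsL kv || pvIsM kv || pvIsO kv) := by
    intro kv hkv
    refine pvContains hn (fun q => pvIsL q || pvIsM q || pvIsO q) _ (fun q => ?_) hkv
    rw [e3]
    simp only [List.mem_append, List.mem_filter, Bool.or_eq_true]
    tauto
  have h2_3 : ∀ kv ∈ xs,
      ∀ q ∈ (pvIns "ORG" xs (pvIns "MISC" xs (pvIns "LOC" xs PySem.Dict.empty))).items,
      q.1 = kv.1 → q = kv := by
    intro kv hkv q hq h
    rw [e3] at hq
    rcases List.mem_append.mp hq with hq' | hq'
    · rcases List.mem_append.mp hq' with hq'' | hq'' <;>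
        exact pvKeyInj hn (List.mem_filter.mp hq'').1 hkv h
    · exact pvKeyInj hn (List.mem_filter.mp hq').1 hkv h
  -- stage 4: PER
  rw [hA, pvInner _ _ _ hn h2_3, e3]
  congr 1
  apply List.filter_congr
  intro r hr
  rw [c3 r hr]
  simp only [pvIsL, pvIsM, pvIsO, pvIsP]
  exact bool4 _ _ _ _

-- ===== VERDICT (by name: the statement is the Claim_ definition above) =====
theorem filter_ne_type_spec : Claim_equal_filter_ne_type := by
  intro xs _ hpre
  unfold Spec_filter_ne_type
  rw [pvB_eq, pvA_eq xs hpre]
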